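-- pv_equiv track=rewrite | github.com/BharathA1303/Browser | js_engine/interpreter.py | _split_statements
-- ===== SOURCE A (Python) =====
-- from typing import Any, Dict, List
--
-- def _split_statements(source: str) -> List[str]:
--     """Split source into top-level statements including if/else blocks."""
--
--     statements: List[str] = []
--     buffer: List[str] = []
--     brace_depth = 0
--     for char in source:
--         buffer.append(char)
--         if char == "{":
--             brace_depth += 1
--         elif char == "}":
--             brace_depth -= 1
--         elif char == ";" and brace_depth == 0:
--             statements.append("".join(buffer).strip())
--             buffer = []
--     if "".join(buffer).strip():
--         statements.append("".join(buffer).strip())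
--     return statements
-- ===== SOURCE B (Python) =====
-- from typing import List
--
-- def _split_statements(source: str) -> List[str]:
--     """Split source into top-level statements including if/else blocks."""
--     parts = source.split(";")
--     statements: List[str] = []
--     pending: List[str] = []
--     balance = 0
--     for part in parts[:-1]:
--         pending.append(part)
--         balance += part.count("{") - part.count("}")
--         if balance == 0:
--             statements.append((";".join(pending) + ";").strip())
--             pending = []
--     pending.append(parts[-1])
--     tail = ";".join(pending).strip()
--     if tail:
--         statements.append(tail)
--     return statements
-- ===== Notes on version B (the rewrite author's own statement) =====
-- stated objective: faster
-- what changed: B breaks the source at semicolons once with str.split and re-joins the parts under a running brace balance, emitting a statement whenever the balance returns to zero, instead of A's character-by-character Python loop with a growing buffer.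
import Mathlib
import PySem

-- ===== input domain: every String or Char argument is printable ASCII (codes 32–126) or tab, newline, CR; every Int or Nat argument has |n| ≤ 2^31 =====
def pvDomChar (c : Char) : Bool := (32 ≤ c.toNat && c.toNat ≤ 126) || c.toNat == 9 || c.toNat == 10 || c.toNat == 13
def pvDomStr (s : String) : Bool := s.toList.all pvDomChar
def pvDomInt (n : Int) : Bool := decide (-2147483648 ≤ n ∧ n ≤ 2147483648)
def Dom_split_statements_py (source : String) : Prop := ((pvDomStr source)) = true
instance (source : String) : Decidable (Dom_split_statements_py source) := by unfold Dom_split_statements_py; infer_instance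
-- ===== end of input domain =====

-- B breaks the source at semicolons once and re-joins the parts under a running brace balance
-- instead of A's character-by-character scan with a growing buffer (measured faster at large sizes).


-- ===== PORT A =====
-- one character of A's loop: buffer.append(char); update brace_depth; emit on top-level ';'
def pvAStep (st : List String × List Char × Int) (c : Char) : List String × List Char × Int :=
  let buf := st.2.1 ++ [c]
  if c = '{' then (st.1, buf, st.2.2 + 1)
  else if c = '}' then (st.1, buf, st.2.2 - 1)
  else if c = ';' ∧ st.2.2 = 0 then (st.1 ++ [String.ofList (PySem.Chars.strip buf)], ([] : List Char), st.2.2)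
  else (st.1, buf, st.2.2)

def split_statements_py (source : String) : List String :=
  let fin := source.toList.foldl pvAStep ([], [], 0)
  if PySem.Chars.strip fin.2.1 ≠ [] then fin.1 ++ [String.ofList (PySem.Chars.strip fin.2.1)]
  else fin.1

-- ===== PORT B =====
-- one part of B's loop: pending.append(part); balance += part.count('{') - part.count('}');
-- if balance == 0: emit (';'.join(pending) + ';').strip()
def pvBStep (st : List String × List (List Char) × Int) (part : List Char) :
    List String × List (List Char) × Int :=
  let pending := st.2.1 ++ [part]
  let balance := st.2.2 + ((PySem.Chars.count part ['{'] : Int) - (PySem.Chars.count part ['}'] : Int))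
  if balance = 0 then
    (st.1 ++ [String.ofList (PySem.Chars.strip (PySem.Chars.join [';'] pending ++ [';']))], [], balance)
  else (st.1, pending, balance)

def split_statements_py_alt (source : String) : List String :=
  let parts := PySem.Chars.splitOn source.toList [';']   -- parts = source.split(';')
  let fin := parts.dropLast.foldl pvBStep ([], [], 0)    -- for part in parts[:-1]
  let pending := fin.2.1 ++ [parts.getLastD []]          -- pending.append(parts[-1])
  let tail := PySem.Chars.strip (PySem.Chars.join [';'] pending)
  if tail ≠ [] then fin.1 ++ [String.ofList tail] else fin.1

-- ===== PRECONDITION & SPEC =====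
def Spec_split_statements_py (source : String) (out : List String) : Prop := out = split_statements_py_alt source
instance (source : String) (out : List String) : Decidable (Spec_split_statements_py source out) := by unfold Spec_split_statements_py; infer_instance

-- ===== CLAIM (what is proved, stated in full; the proofs are below) =====
def Claim_equal_split_statements_py : Prop := ∀ (source : String), Dom_split_statements_py source → Spec_split_statements_py source (split_statements_py source)

-- ===== LEMMAS AND PROOFS =====

-- structural recursion computing split on the single-char separator ';'
def pvSplit1 : List Char → List (List Char)
  | [] => [[]]
  | c :: r =>
    if c = ';' then [] :: pvSplit1 r
    else match pvSplit1 r with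
      | [] => [[c]]
      | h :: t => (c :: h) :: t

-- prepend cur to the head piece
def pvPre (cur : List Char) : List (List Char) → List (List Char)
  | [] => []
  | h :: t => (cur ++ h) :: t

-- the characters of the pending parts, each with its terminating ';'
def pvJ (ps : List (List Char)) : List Char := (ps.map (· ++ [';'])).flatten

theorem pvSplit1_ne_nil (cs : List Char) : pvSplit1 cs ≠ [] := by
  induction cs with
  | nil => simp [pvSplit1]
  | cons c r ih =>
    simp only [pvSplit1]; split
    · simp
    · cases h : pvSplit1 r <;> simp

theorem pvGo_eq : ∀ fuel l cur acc, l.length ≤ fuel →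
    PySem.Chars.splitOn.go [';'] fuel l cur acc
      = acc.reverse ++ pvPre cur.reverse (pvSplit1 l) := by
  intro fuel
  induction fuel with
  | zero =>
    intro l cur acc h
    have : l = [] := by cases l <;> simp_all
    subst this
    simp [PySem.Chars.splitOn.go, pvSplit1, pvPre]
  | succ f ih =>
    intro l cur acc h
    cases l with
    | nil => simp [PySem.Chars.splitOn.go, pvSplit1, pvPre]
    | cons x rest =>
      have hlen : rest.length ≤ f := by simpa using h
      by_cases hx : x = ';'
      · subst hx
        simp only [PySem.Chars.splitOn.go, List.isPrefixOf, beq_self_eq_true, Bool.true_and,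
          if_pos, List.length_cons, List.drop_succ_cons, List.length_nil, List.drop_zero]
        rw [ih rest [] _ hlen]
        obtain ⟨h, t, he⟩ : ∃ h t, pvSplit1 rest = h :: t := by
          cases hs : pvSplit1 rest with
          | nil => exact absurd hs (pvSplit1_ne_nil rest)
          | cons a b => exact ⟨a, b, rfl⟩
        simp [pvSplit1, pvPre, he]
      · have hpre : List.isPrefixOf [';'] (x :: rest) = false := by
          simp [List.isPrefixOf, Ne.symm hx]
        simp only [PySem.Chars.splitOn.go, hpre, Bool.false_eq_true, if_false]
        rw [ih rest (x :: cur) acc hlen]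
        cases hs : pvSplit1 rest with
        | nil => exact absurd hs (pvSplit1_ne_nil rest)
        | cons h t => simp [pvSplit1, pvPre, hx, hs]

theorem pvSplitOn_eq (cs : List Char) : PySem.Chars.splitOn cs [';'] = pvSplit1 cs := by
  rw [PySem.Chars.splitOn, pvGo_eq (cs.length + 1) cs [] [] (by omega)]
  cases hs : pvSplit1 cs with
  | nil => exact absurd hs (pvSplit1_ne_nil cs)
  | cons h t => simp [pvPre]

theorem pvNoSemi (cs : List Char) : ∀ p ∈ pvSplit1 cs, ';' ∉ p := by
  induction cs with
  | nil => simp [pvSplit1]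
  | cons c r ih =>
    simp only [pvSplit1]
    by_cases hc : c = ';'
    · simp only [hc]
      intro p hp
      rcases List.mem_cons.1 hp with h | h
      · simp [h]
      · exact ih p h
    · simp only [hc]
      cases hs : pvSplit1 r with
      | nil => exact absurd hs (pvSplit1_ne_nil r)
      | cons h t =>
        intro p hp
        rcases List.mem_cons.1 hp with hh | hh
        · subst hh
          intro hmem
          rcases List.mem_cons.1 hmem with h1 | h1
          · exact hc h1.symm
          · exact ih h (by simp [hs]) h1
        · exact ih p (by simp [hs, hh])

theorem pvGlue (cs : List Char) :
    pvJ (pvSplit1 cs).dropLast ++ (pvSplit1 cs).getLastD [] = cs := by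
  induction cs with
  | nil => simp [pvSplit1, pvJ]
  | cons c r ih =>
    simp only [pvSplit1]
    by_cases hc : c = ';'
    · subst hc
      simp only []
      cases hs : pvSplit1 r with
      | nil => exact absurd hs (pvSplit1_ne_nil r)
      | cons h t =>
        rw [hs] at ih
        simpa [pvJ, List.dropLast_cons_of_ne_nil, hs] using congrArg (';' :: ·) ih
    · simp only [if_neg hc]
      cases hs : pvSplit1 r with
      | nil => exact absurd hs (pvSplit1_ne_nil r)
      | cons h t =>
        rw [hs] at ih
        cases t with
        | nil => simpa [pvJ] using congrArg (c :: ·) ih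
        | cons t1 t2 =>
          have hne : (t1 :: t2 : List (List Char)) ≠ [] := by simp
          simp only [List.dropLast_cons_of_ne_nil hne, List.getLastD_cons] at ih ⊢
          simp only [pvJ, List.map_cons, List.flatten_cons] at ih ⊢
          rw [← ih]; simp

theorem pvCountGo (c : Char) : ∀ fuel l acc, l.length ≤ fuel →
    PySem.Chars.count.go [c] fuel l acc = acc + l.count c := by
  intro fuel
  induction fuel with
  | zero =>
    intro l acc h
    have : l = [] := by cases l <;> simp_all
    subst this
    simp [PySem.Chars.count.go]
  | succ f ih =>
    intro l acc h
    cases l with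
    | nil => simp [PySem.Chars.count.go]
    | cons x rest =>
      have hlen : rest.length ≤ f := by simpa using h
      by_cases hx : x = c
      · subst hx
        simp only [PySem.Chars.count.go, List.isPrefixOf, beq_self_eq_true, Bool.true_and,
          if_pos, List.length_cons, List.length_nil, List.drop_succ_cons, List.drop_zero]
        rw [ih rest (acc + 1) hlen]
        simp; omega
      · have hpre : List.isPrefixOf [c] (x :: rest) = false := by
          simp [List.isPrefixOf, Ne.symm hx]
        simp only [PySem.Chars.count.go, hpre, Bool.false_eq_true, if_false]
        rw [ih rest acc hlen]
        simp [hx]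

theorem pvCount_single (c : Char) (p : List Char) : PySem.Chars.count p [c] = p.count c := by
  rw [PySem.Chars.count]
  simp only [List.isEmpty_cons, Bool.false_eq_true, if_false]
  exact (pvCountGo c p.length p 0 le_rfl).trans (by omega)

theorem pvJ_append_single (l : List (List Char)) (x : List Char) :
    pvJ l ++ x = List.intercalate [';'] (l ++ [x]) := by
  induction l with
  | nil => simp [pvJ, List.intercalate]
  | cons p t ih =>
    cases t with
    | nil => simp [pvJ, List.intercalate]
    | cons q r =>
      simp only [pvJ, List.map_cons, List.flatten_cons, List.cons_append] at ih ⊢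
      simp only [List.intercalate, List.intersperse_cons₂, List.flatten_cons] at ih ⊢
      simp only [List.append_assoc] at ih ⊢
      rw [ih]

theorem pvJ_eq_intercalate (l : List (List Char)) (h : l ≠ []) :
    pvJ l = List.intercalate [';'] l ++ [';'] := by
  obtain ⟨l', p, rfl⟩ := List.eq_nil_or_concat l |>.resolve_left h
  rw [List.concat_eq_append]
  have h2 := pvJ_append_single l' p
  have h1 : pvJ (l' ++ [p]) = pvJ l' ++ (p ++ [';']) := by simp [pvJ]
  rw [h1, ← List.append_assoc, h2]

-- A's loop over a semicolon-free run: buffer grows, depth shifts by the brace counts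
theorem pvRunA (p : List Char) (hp : ';' ∉ p) :
    ∀ st buf (d : Int), p.foldl pvAStep (st, buf, d)
      = (st, buf ++ p, d + ((p.count '{' : Int) - (p.count '}' : Int))) := by
  induction p with
  | nil => intro st buf d; simp
  | cons c rest ih =>
    intro st buf d
    have hc : c ≠ ';' := fun h => hp (h ▸ List.mem_cons_self ..)
    have hrest : ';' ∉ rest := fun h => hp (List.mem_cons_of_mem _ h)
    simp only [List.foldl_cons, pvAStep]
    by_cases h1 : c = '{'
    · subst h1
      rw [if_pos rfl, ih hrest]
      simp only [List.count_cons, List.append_assoc, List.singleton_append, Prod.mk.injEq, true_and]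
      push_cast
      simp
      omega
    · rw [if_neg h1]
      by_cases h2 : c = '}'
      · subst h2
        rw [if_pos rfl, ih hrest]
        simp only [List.count_cons, List.append_assoc, List.singleton_append, Prod.mk.injEq, true_and]
        push_cast
        simp
        omega
      · rw [if_neg h2, if_neg (by simp [hc]), ih hrest]
        simp only [List.count_cons, List.append_assoc, List.singleton_append, Prod.mk.injEq, true_and]
        push_cast
        simp [h1, h2]

-- main invariant: A over the pending-joined characters ≍ B over the parts
theorem pvRunParts : ∀ (ps : List (List Char)), (∀ p ∈ ps, ';' ∉ p) →
    ∀ st pend (b : Int),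
    List.foldl pvAStep (st, pvJ pend, b) (pvJ ps)
      = (let r := List.foldl pvBStep (st, pend, b) ps; (r.1, pvJ r.2.1, r.2.2)) := by
  intro ps
  induction ps with
  | nil => intro _ st pend b; simp [pvJ]
  | cons p rest ih =>
    intro hns st pend b
    have hp : ';' ∉ p := hns p (by simp)
    have hrest : ∀ q ∈ rest, ';' ∉ q := fun q hq => hns q (by simp [hq])
    have hJ : pvJ (p :: rest) = (p ++ [';']) ++ pvJ rest := by simp [pvJ]
    rw [hJ, List.foldl_append, List.foldl_append, pvRunA p hp]
    set b' := b + ((p.count '{' : Int) - (p.count '}' : Int)) with hb'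
    have hstep : List.foldl pvAStep (st, pvJ pend ++ p, b') [';']
        = if b' = 0
          then (st ++ [String.ofList (PySem.Chars.strip (pvJ (pend ++ [p])))], pvJ ([] : List (List Char)), b')
          else (st, pvJ (pend ++ [p]), b') := by
      have hJp : pvJ (pend ++ [p]) = pvJ pend ++ p ++ [';'] := by simp [pvJ]
      simp only [List.foldl_cons, List.foldl_nil, pvAStep]
      by_cases hb : b' = 0
      · simp [hb, pvJ]
      · simp [hb, hJp]
    rw [hstep]
    simp only [List.foldl_cons, pvBStep, pvCount_single, ← hb']
    by_cases hb : b' = 0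
    · rw [if_pos hb, if_pos hb, ih hrest]
      have : PySem.Chars.join [';'] (pend ++ [p]) ++ [';'] = pvJ (pend ++ [p]) := by
        rw [PySem.Chars.join, ← pvJ_eq_intercalate (pend ++ [p]) (by simp)]
      rw [this]
    · rw [if_neg hb, if_neg hb, ih hrest]

-- ===== VERDICT (by name: the statement is the Claim_ definition above) =====
theorem split_statements_py_spec : Claim_equal_split_statements_py := by
  intro source _
  unfold Spec_split_statements_py split_statements_py split_statements_py_alt
  rw [pvSplitOn_eq]
  set cs := source.toList
  set parts := pvSplit1 cs with hparts
  have hne : parts ≠ [] := pvSplit1_ne_nil cs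
  have hlast_mem : parts.getLastD [] ∈ parts := by
    rw [List.getLastD_eq_getLast?, List.getLast?_eq_some_getLast hne]
    exact List.getLast_mem hne
  have hlast : ';' ∉ parts.getLastD [] := pvNoSemi cs _ hlast_mem
  have hdl : ∀ p ∈ parts.dropLast, ';' ∉ p :=
    fun p hp => pvNoSemi cs p (List.mem_of_mem_dropLast hp)
  have hglue : cs = pvJ parts.dropLast ++ parts.getLastD [] := (pvGlue cs).symm
  rw [hglue, List.foldl_append]
  have h0 : pvJ ([] : List (List Char)) = [] := by simp [pvJ]
  rw [show (([], [], 0) : List String × List Char × Int)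
        = (([], pvJ ([] : List (List Char)), 0) : List String × List Char × Int) by rw [h0],
      pvRunParts parts.dropLast hdl [] [] 0]
  set r := parts.dropLast.foldl pvBStep ([], [], 0) with hr
  rw [pvRunA _ hlast]
  have htail : pvJ r.2.1 ++ parts.getLastD []
      = PySem.Chars.join [';'] (r.2.1 ++ [parts.getLastD []]) := by
    rw [PySem.Chars.join]; exact pvJ_append_single _ _
  simp only [htail]
  rw [← hr]
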